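-- pv_equiv track=rewrite | github.com/NizarBelaatik/Master | S1/Python/TD1/TD1.py | PGDS
-- ===== SOURCE A (Python) =====
-- def PGDS(n):
--     div=[]
--     for i in range(2,n):
--         if n%i ==0 :
--             div.append(i)
--
--     if not div:
--         return -1
--     else:
--         return div[-1]
-- ===== SOURCE B (Python) =====
-- def PGDS(n):
--     if n < 4:
--         return -1
--     i = 2
--     while i * i <= n:
--         if n % i == 0:
--             return n // i
--         i += 1
--     return -1
-- ===== Notes on version B (the rewrite author's own statement) =====
-- stated objective: faster
-- what changed: Instead of collecting every divisor in [2,n) and taking the last, B trial-divides only up to sqrt(n) to find the smallest factor and returns n // smallest_factor (or -1 when none, i.e. n prime or n < 4).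
import Mathlib
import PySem

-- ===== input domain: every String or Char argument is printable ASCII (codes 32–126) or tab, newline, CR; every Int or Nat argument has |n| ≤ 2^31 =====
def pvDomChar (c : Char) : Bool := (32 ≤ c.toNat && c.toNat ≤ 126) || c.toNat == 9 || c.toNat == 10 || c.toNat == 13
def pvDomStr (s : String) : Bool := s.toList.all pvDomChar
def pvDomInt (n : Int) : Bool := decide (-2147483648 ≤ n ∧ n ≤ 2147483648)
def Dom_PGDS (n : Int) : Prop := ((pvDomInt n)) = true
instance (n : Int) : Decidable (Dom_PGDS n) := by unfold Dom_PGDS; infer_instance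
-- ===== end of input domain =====

-- B replaces A's full scan of [2, n) with trial division up to sqrt(n): largest proper divisor = n / smallest factor.


-- ===== PORT A =====
def PGDS (n : Int) : Int :=
  let div := (PySem.List.pyRange 2 n 1).foldl
    (fun acc i => if PySem.Int.mod n i == 0 then acc ++ [i] else acc) []
  if div = [] then -1
  else (PySem.List.pyGet? div (-1)).getD (-1)  -- div[-1]; div is nonempty here so the default is unreachable

-- ===== PORT B =====
def PGDS_altLoop (n i : Int) (hi : 2 ≤ i) : Int :=
  if h : i * i ≤ n then
    if PySem.Int.mod n i == 0 then PySem.Int.floordiv n i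
    else PGDS_altLoop n (i + 1) (by omega)
  else -1
termination_by (n + 1 - i).toNat
decreasing_by
  have h1 : i ≤ i * i := by nlinarith
  omega

def PGDS_alt (n : Int) : Int :=
  if n < 4 then -1 else PGDS_altLoop n 2 (by norm_num)

-- ===== PRECONDITION & SPEC =====
def Spec_PGDS (n : Int) (out : Int) : Prop := out = PGDS_alt n
instance (n : Int) (out : Int) : Decidable (Spec_PGDS n out) := by unfold Spec_PGDS; infer_instance

-- ===== CLAIM (what is proved, stated in full; the proofs are below) =====
def Claim_equal_PGDS : Prop := ∀ (n : Int), Dom_PGDS n → Spec_PGDS n (PGDS n)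

-- ===== LEMMAS AND PROOFS =====

-- A's divisor list
def pvE (p : Int → Bool) (n : Int) : List Int := (PySem.List.pyRange 2 n 1).filter p

lemma PGDS_eq (n : Int) :
    PGDS n = (if pvE (fun i => PySem.Int.mod n i == 0) n = [] then -1
      else ((pvE (fun i => PySem.Int.mod n i == 0) n).getLast?).getD (-1)) := by
  rw [PGDS, pvE]
  simp only [PySem.List.foldl_append_if_eq_filter, List.nil_append, PySem.List.pyGet?_neg_one]

-- on a strictly increasing list, the last surviving element of a filter is the greatest satisfying one
lemma getLast_filter_max (p : Int → Bool) (l : List Int) (hsorted : l.Pairwise (· < ·))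
    (d : Int) (hd : d ∈ l) (hp : p d = true) (hmax : ∀ e ∈ l, d < e → ¬ p e = true) :
    (l.filter p).getLast? = some d := by
  induction l with
  | nil => cases hd
  | cons a l ih =>
    rw [List.pairwise_cons] at hsorted
    obtain ⟨hall, hpl⟩ := hsorted
    rcases List.mem_cons.mp hd with rfl | hdl
    · have hfl : l.filter p = [] := List.filter_eq_nil_iff.mpr
        (fun e he => hmax e (List.mem_cons_of_mem _ he) (hall e he))
      rw [List.filter_cons, if_pos hp, hfl]
      rfl
    · have ih' := ih hpl hdl (fun e he hde => hmax e (List.mem_cons_of_mem _ he) hde)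
      rw [List.filter_cons]
      split_ifs with hpa
      · have hne : l.filter p ≠ [] := by
          intro h0; rw [h0] at ih'; simp at ih'
        obtain ⟨b, t, hbt⟩ := List.exists_cons_of_ne_nil hne
        rw [hbt] at ih' ⊢
        rw [List.getLast?_cons_cons]
        exact ih'
      · exact ih'

lemma pyRange_pairwise (a b : Int) : (PySem.List.pyRange a b 1).Pairwise (· < ·) := by
  rw [PySem.List.pyRange_one]
  exact List.Pairwise.map _ (fun x y (h : x < y) => by omega) List.pairwise_lt_range

lemma PGDS_of_no_divisor (n : Int)
    (h : ∀ d : Int, 2 ≤ d → d < n → ¬ d ∣ n) : PGDS n = -1 := by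
  rw [PGDS_eq, if_pos]
  rw [pvE, List.filter_eq_nil_iff]
  intro a ha
  rw [PySem.List.mem_pyRange_one] at ha
  intro hp
  exact h a ha.1 ha.2 ((PySem.Int.mod_eq_zero_iff_dvd n a).mp (by simpa using hp))

lemma PGDS_of_max_divisor (n d : Int) (hd2 : 2 ≤ d) (hdn : d < n)
    (hdvd : d ∣ n) (hmax : ∀ e : Int, d < e → e < n → ¬ e ∣ n) : PGDS n = d := by
  have hlast : (pvE (fun i => PySem.Int.mod n i == 0) n).getLast? = some d := by
    rw [pvE]
    apply getLast_filter_max _ _ (pyRange_pairwise 2 n) d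
    · rw [PySem.List.mem_pyRange_one]; exact ⟨hd2, hdn⟩
    · simp [(PySem.Int.mod_eq_zero_iff_dvd n d).mpr hdvd]
    · intro e he hde hp
      rw [PySem.List.mem_pyRange_one] at he
      exact hmax e hde he.2 ((PySem.Int.mod_eq_zero_iff_dvd n e).mp (by simpa using hp))
  have hne : pvE (fun i => PySem.Int.mod n i == 0) n ≠ [] := by
    intro h0; rw [h0] at hlast; simp at hlast
  rw [PGDS_eq, if_neg hne, hlast]
  rfl

-- the loop invariant of B's trial division
lemma PGDS_altLoop_spec (n : Int) : ∀ (K : Nat) (i : Int) (hi : 2 ≤ i), (n + 1 - i).toNat ≤ K →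
    (∃ i0, i ≤ i0 ∧ i0 * i0 ≤ n ∧ i0 ∣ n ∧ (∀ j, i ≤ j → j < i0 → ¬ j ∣ n) ∧
      PGDS_altLoop n i hi = n / i0)
    ∨ ((∀ j, i ≤ j → j * j ≤ n → ¬ j ∣ n) ∧ PGDS_altLoop n i hi = -1) := by
  intro K
  induction K with
  | zero =>
    intro i hi hK
    have hlt : n < i := by omega
    have hns : ¬ i * i ≤ n := by nlinarith
    right
    refine ⟨fun j hj hjj => absurd hjj (by nlinarith), ?_⟩
    rw [PGDS_altLoop, dif_neg hns]
  | succ K ih =>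
    intro i hi hK
    by_cases h : i * i ≤ n
    · by_cases hd : PySem.Int.mod n i == 0
      · left
        refine ⟨i, le_refl i, h, ?_, fun j hj hji => absurd hji (by omega), ?_⟩
        · exact (PySem.Int.mod_eq_zero_iff_dvd n i).mp (by simpa using hd)
        · rw [PGDS_altLoop, dif_pos h, if_pos hd,
            PySem.Int.floordiv_eq_ediv_of_pos (by omega : (0:Int) < i)]
      · have hndvd : ¬ i ∣ n := fun hdvd =>
          hd (by simp [(PySem.Int.mod_eq_zero_iff_dvd n i).mpr hdvd])
        have hK' : (n + 1 - (i + 1)).toNat ≤ K := by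
          have h1 : i ≤ i * i := by nlinarith
          omega
        have hstep : PGDS_altLoop n i hi = PGDS_altLoop n (i + 1) (by omega) := by
          rw [PGDS_altLoop, dif_pos h, if_neg hd]
        rcases ih (i + 1) (by omega) hK' with ⟨i0, h1, h2, h3, h4, h5⟩ | ⟨h1, h2⟩
        · left
          refine ⟨i0, by omega, h2, h3, ?_, hstep.trans h5⟩
          intro j hj hji
          rcases eq_or_lt_of_le hj with rfl | hlt
          · exact hndvd
          · exact h4 j (by omega) hji
        · right
          refine ⟨?_, hstep.trans h2⟩
          intro j hj hjj
          rcases eq_or_lt_of_le hj with rfl | hlt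
          · exact hndvd
          · exact h1 j (by omega) hjj
    · right
      refine ⟨fun j hj hjj => absurd hjj (by nlinarith), ?_⟩
      rw [PGDS_altLoop, dif_neg h]

-- every proper divisor pairs with a cofactor ≥ 2
lemma cofactor_ge_two (n d e : Int) (hd2 : 2 ≤ d) (hdn : d < n)
    (he : n = d * e) : 2 ≤ e := by
  by_contra hlt
  push_neg at hlt
  have h0 : e ≤ 0 ∨ e = 1 := by omega
  rcases h0 with h0 | rfl
  · nlinarith
  · nlinarith

lemma main_ge_four (n : Int) (hn : 4 ≤ n) : PGDS n = PGDS_altLoop n 2 (by norm_num) := by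
  rcases PGDS_altLoop_spec n (n + 1 - 2).toNat 2 (by norm_num) (le_refl _) with
    ⟨i0, hi0ge, hi0sq, hi0dvd, hi0min, hret⟩ | ⟨hnone, hret⟩
  · -- smallest factor i0 found; B returns n / i0, which is the largest proper divisor
    obtain ⟨c, hc⟩ := hi0dvd
    have hi0pos : (0 : Int) < i0 := by omega
    have hdivc : n / i0 = c := by rw [hc]; exact Int.mul_ediv_cancel_left c (by omega)
    have hc2 : 2 ≤ c := by
      have hle : i0 ≤ c := by nlinarith
      omega
    have hcn : c < n := by nlinarith
    have hcdvd : c ∣ n := ⟨i0, by linarith [hc, mul_comm i0 c]⟩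
    have hmax : ∀ e : Int, c < e → e < n → ¬ e ∣ n := by
      rintro e hce hen ⟨f, hf⟩
      have hf2 : 2 ≤ f := cofactor_ge_two n e f (by omega) hen hf
      have hfi0 : i0 ≤ f := by
        by_contra hlt
        push_neg at hlt
        exact hi0min f hf2 hlt ⟨e, by linarith [hf, mul_comm e f]⟩
      nlinarith
    rw [hret, hdivc]
    exact PGDS_of_max_divisor n c hc2 hcn hcdvd hmax
  · -- no factor up to sqrt(n): n is prime, both return -1
    rw [hret]
    apply PGDS_of_no_divisor n
    rintro d hd2 hdn ⟨e, he⟩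
    have he2 : 2 ≤ e := cofactor_ge_two n d e hd2 hdn he
    rcases le_total d e with hle | hle
    · exact absurd ⟨e, he⟩ (hnone d hd2 (by nlinarith))
    · exact absurd (⟨d, by linarith [he, mul_comm d e]⟩ : e ∣ n) (hnone e he2 (by nlinarith))

lemma PGDS_small (n : Int) (hn : n ≤ 3) : PGDS n = -1 := by
  rcases eq_or_lt_of_le hn with rfl | hlt
  · decide
  · -- n ≤ 2: range(2, n) is empty, so div is empty
    rw [PGDS_eq, if_pos]
    rw [pvE, PySem.List.pyRange_one]
    have h0 : (n - 2).toNat = 0 := by omega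
    rw [h0]
    simp

-- ===== VERDICT (by name: the statement is the Claim_ definition above) =====
theorem PGDS_spec : Claim_equal_PGDS := by
  intro n _
  unfold Spec_PGDS PGDS_alt
  by_cases h : n < 4
  · rw [if_pos h]
    exact PGDS_small n (by omega)
  · rw [if_neg h]
    exact main_ge_four n (by omega)
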